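-- pv_equiv track=rewrite | github.com/Hyperiongate/News | services/news_analyzer.py | _generate_fact_check_summary
-- ===== SOURCE A (Python) =====
-- def _generate_fact_check_summary(fact_checks):
--     """Generate summary of fact check results"""
--     if not fact_checks:
--         return "No fact checks performed."
--
--     total = len(fact_checks)
--     verified = sum(1 for fc in fact_checks if fc.get('verdict') == 'true')
--     false = sum(1 for fc in fact_checks if fc.get('verdict') == 'false')
--     mixed = sum(1 for fc in fact_checks if fc.get('verdict') in ['partially_true', 'mixed'])
--
--     return f"Checked {total} claims: {verified} verified as true, {false} found false, {mixed} partially true."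
-- ===== SOURCE B (Python) =====
-- def _generate_fact_check_summary(fact_checks):
--     """Generate summary of fact check results (one-pass frequency table)."""
--     if not fact_checks:
--         return "No fact checks performed."
--
--     total = len(fact_checks)
--     counts = {}
--     for fc in fact_checks:
--         v = fc.get('verdict')
--         counts[v] = counts.get(v, 0) + 1
--
--     verified = counts.get('true', 0)
--     false = counts.get('false', 0)
--     mixed = counts.get('partially_true', 0) + counts.get('mixed', 0)
--
--     return f"Checked {total} claims: {verified} verified as true, {false} found false, {mixed} partially true."
-- ===== Notes on version B (the rewrite author's own statement) =====
-- stated objective: idiomatic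
-- what changed: Replaces three separate counting scans over fact_checks with a single pass that builds one verdict-frequency table, from which all three counts are read in O(1).
import Mathlib
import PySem

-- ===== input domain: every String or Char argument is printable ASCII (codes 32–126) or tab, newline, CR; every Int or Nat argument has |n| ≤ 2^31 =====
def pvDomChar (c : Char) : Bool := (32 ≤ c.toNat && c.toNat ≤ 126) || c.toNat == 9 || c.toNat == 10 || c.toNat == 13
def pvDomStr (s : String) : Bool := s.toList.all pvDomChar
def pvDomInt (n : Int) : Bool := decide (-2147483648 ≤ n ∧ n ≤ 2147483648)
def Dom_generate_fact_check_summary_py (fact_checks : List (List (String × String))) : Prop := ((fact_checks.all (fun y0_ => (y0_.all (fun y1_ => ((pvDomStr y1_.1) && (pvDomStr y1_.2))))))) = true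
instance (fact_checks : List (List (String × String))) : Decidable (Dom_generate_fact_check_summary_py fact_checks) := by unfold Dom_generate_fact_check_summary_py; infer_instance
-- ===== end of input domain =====

-- B replaces A's three separate counting scans with one pass building a verdict-frequency table (same output; no speed claim).


-- ===== PORT A =====
-- fc.get('verdict'): dict lookup returning None when absent
def pvVerdict (fc : List (String × String)) : Option String :=
  (PySem.Dict.mk fc).get? "verdict"

def generate_fact_check_summary_py (fact_checks : List (List (String × String))) : String :=
  if fact_checks = [] then "No fact checks performed."
  else
    let total : Int := fact_checks.length
    let verified : Int :=
      fact_checks.foldl (fun acc fc => if pvVerdict fc == some "true" then acc + 1 else acc) 0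
    let fls : Int :=
      fact_checks.foldl (fun acc fc => if pvVerdict fc == some "false" then acc + 1 else acc) 0
    let mixed : Int :=
      fact_checks.foldl
        (fun acc fc =>
          if (pvVerdict fc == some "partially_true" || pvVerdict fc == some "mixed") then acc + 1
          else acc) 0
    "Checked " ++ PySem.Int.toStr total ++ " claims: " ++ PySem.Int.toStr verified ++
      " verified as true, " ++ PySem.Int.toStr fls ++ " found false, " ++
      PySem.Int.toStr mixed ++ " partially true."

-- ===== PORT B =====
def generate_fact_check_summary_py_alt (fact_checks : List (List (String × String))) : String :=
  if fact_checks = [] then "No fact checks performed."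
  else
    let total : Int := fact_checks.length
    let counts : PySem.Dict (Option String) Int :=
      fact_checks.foldl
        (fun d fc =>
          let v := (PySem.Dict.mk fc).get? "verdict"
          d.insert v (d.getD v 0 + 1)) PySem.Dict.empty
    let verified : Int := counts.getD (some "true") 0
    let fls : Int := counts.getD (some "false") 0
    let mixed : Int := counts.getD (some "partially_true") 0 + counts.getD (some "mixed") 0
    "Checked " ++ PySem.Int.toStr total ++ " claims: " ++ PySem.Int.toStr verified ++
      " verified as true, " ++ PySem.Int.toStr fls ++ " found false, " ++
      PySem.Int.toStr mixed ++ " partially true."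

-- ===== PRECONDITION & SPEC =====
def Spec_generate_fact_check_summary_py (fact_checks : List (List (String × String))) (out : String) : Prop := out = generate_fact_check_summary_py_alt fact_checks
instance (fact_checks : List (List (String × String))) (out : String) : Decidable (Spec_generate_fact_check_summary_py fact_checks out) := by unfold Spec_generate_fact_check_summary_py; infer_instance

-- ===== CLAIM (what is proved, stated in full; the proofs are below) =====
def Claim_equal_generate_fact_check_summary_py : Prop := ∀ (fact_checks : List (List (String × String))), Dom_generate_fact_check_summary_py fact_checks → Spec_generate_fact_check_summary_py fact_checks (generate_fact_check_summary_py fact_checks)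

-- ===== LEMMAS AND PROOFS =====

-- B's table read at key v is the number of fact checks whose verdict is v
lemma counts_getD (fact_checks : List (List (String × String))) (v : Option String) :
    (fact_checks.foldl
        (fun (d : PySem.Dict (Option String) Int) fc =>
          let w := (PySem.Dict.mk fc).get? "verdict"
          d.insert w (d.getD w 0 + 1)) PySem.Dict.empty).getD v 0
      = ((fact_checks.map pvVerdict).count v : Int) := by
  show (fact_checks.foldl
      (fun (d : PySem.Dict (Option String) Int) fc =>
        d.insert (pvVerdict fc) (d.getD (pvVerdict fc) 0 + 1)) PySem.Dict.empty).getD v 0 = _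
  rw [← List.foldl_map (f := pvVerdict)
        (g := fun (d : PySem.Dict (Option String) Int) w => d.insert w (d.getD w 0 + 1))]
  rw [PySem.Dict.getD_foldl_insert_add_one]
  simp

-- A's counting scan with predicate (· == v) counts the fact checks whose verdict is v
lemma scan_count (fact_checks : List (List (String × String))) (v : Option String) :
    fact_checks.foldl (fun (acc : Int) fc => if pvVerdict fc == v then acc + 1 else acc) 0
      = ((fact_checks.map pvVerdict).count v : Int) := by
  rw [PySem.List.foldl_count_if (p := fun fc => pvVerdict fc == v)]
  simp [List.count, List.countP_map, Function.comp_def]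

-- A's membership scan splits into the sum of the two single-verdict counts
lemma scan_count_or (fact_checks : List (List (String × String))) :
    fact_checks.foldl
        (fun (acc : Int) fc =>
          if (pvVerdict fc == some "partially_true" || pvVerdict fc == some "mixed") then acc + 1
          else acc) 0
      = ((fact_checks.map pvVerdict).count (some "partially_true") : Int)
        + ((fact_checks.map pvVerdict).count (some "mixed") : Int) := by
  rw [PySem.List.foldl_count_if
        (p := fun fc => pvVerdict fc == some "partially_true" || pvVerdict fc == some "mixed")]
  induction fact_checks with
  | nil => simp
  | cons fc rest ih =>
    by_cases h1 : pvVerdict fc = some "partially_true"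
    · simp_all [List.countP_cons, List.count_cons]
      omega
    · by_cases h2 : pvVerdict fc = some "mixed" <;>
        simp_all [List.countP_cons, List.count_cons] <;> omega

-- ===== VERDICT (by name: the statement is the Claim_ definition above) =====
theorem generate_fact_check_summary_py_spec : Claim_equal_generate_fact_check_summary_py := by
  intro fact_checks _
  unfold Spec_generate_fact_check_summary_py
  unfold generate_fact_check_summary_py generate_fact_check_summary_py_alt
  by_cases h : fact_checks = []
  · simp [h]
  · simp only [h, if_false]
    rw [counts_getD, counts_getD, counts_getD, counts_getD,
        scan_count, scan_count, scan_count_or]
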